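-- pv_equiv track=rewrite | github.com/VladanPetkovic/vrp_heuristics | data_analysis/scripts/data_preparation.py | get_relative_depot_placement
-- ===== SOURCE A (Python) =====
-- def get_relative_depot_placement(coords, depot_x, depot_y):
--     right = sum(1 for cx, cy in coords if cx > depot_x)
--     left = sum(1 for cx, cy in coords if cx < depot_x)
--     above = sum(1 for cx, cy in coords if cy > depot_y)
--     below = sum(1 for cx, cy in coords if cy < depot_y)
--
--     vertical_position_rel = 'centered'
--     horizontal_position_rel = 'centered'
--     if right > len(coords) * 0.6:
--         horizontal_position_rel = "left-sided"
--     elif left > len(coords) * 0.6: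
--         horizontal_position_rel = "right-sided"
--
--     if above > len(coords) * 0.6:
--         vertical_position_rel = "below"
--     elif below > len(coords) * 0.6:
--         vertical_position_rel = "above"
--
--     return horizontal_position_rel, vertical_position_rel
-- ===== SOURCE B (Python) =====
-- def get_relative_depot_placement(coords, depot_x, depot_y):
--     n = len(coords)
--     xs = sorted(cx for cx, cy in coords)
--     ys = sorted(cy for cx, cy in coords)
--
--     def lower(a, v):
--         # first index i with a[i] >= v (a ascending)
--         lo, hi = 0, len(a)
--         while lo < hi:
--             mid = (lo + hi) // 2
--             if a[mid] < v:
--                 lo = mid + 1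
--             else:
--                 hi = mid
--         return lo
--
--     def upper(a, v):
--         # first index i with a[i] > v (a ascending)
--         lo, hi = 0, len(a)
--         while lo < hi:
--             mid = (lo + hi) // 2
--             if a[mid] <= v:
--                 lo = mid + 1
--             else:
--                 hi = mid
--         return lo
--
--     right = n - upper(xs, depot_x)
--     left = lower(xs, depot_x)
--     above = n - upper(ys, depot_y)
--     below = lower(ys, depot_y)
--
--     horizontal_position_rel = 'centered'
--     vertical_position_rel = 'centered'
--     if right > n * 0.6:
--         horizontal_position_rel = "left-sided"
--     elif left > n * 0.6:
--         horizontal_position_rel = "right-sided"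
--     if above > n * 0.6:
--         vertical_position_rel = "below"
--     elif below > n * 0.6:
--         vertical_position_rel = "above"
--     return horizontal_position_rel, vertical_position_rel
-- ===== Notes on version B (the rewrite author's own statement) =====
-- stated objective: alternative
-- what changed: B sorts the x- and y-coordinates once and obtains each directional count from hand-written binary-search bounds (lower/upper) on the sorted lists, instead of A's four linear counting scans; the threshold classification is unchanged.
import Mathlib
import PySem

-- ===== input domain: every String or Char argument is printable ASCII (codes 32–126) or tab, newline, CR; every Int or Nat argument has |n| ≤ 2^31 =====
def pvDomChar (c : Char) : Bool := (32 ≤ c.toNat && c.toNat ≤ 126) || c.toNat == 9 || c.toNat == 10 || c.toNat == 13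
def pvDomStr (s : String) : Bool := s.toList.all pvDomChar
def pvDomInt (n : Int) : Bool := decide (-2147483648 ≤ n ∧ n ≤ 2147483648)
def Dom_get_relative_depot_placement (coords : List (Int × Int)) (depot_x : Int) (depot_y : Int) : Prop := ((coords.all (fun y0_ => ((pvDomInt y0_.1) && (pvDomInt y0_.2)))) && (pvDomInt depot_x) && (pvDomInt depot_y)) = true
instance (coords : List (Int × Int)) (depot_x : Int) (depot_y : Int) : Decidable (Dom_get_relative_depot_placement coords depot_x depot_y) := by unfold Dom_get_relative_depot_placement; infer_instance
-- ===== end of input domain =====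

-- B sorts the x- and y-coordinates once and obtains the directional counts from hand-written
-- binary-search bounds on the sorted lists, instead of A's four linear counting scans (alternative algorithm).
-- Python's float comparison `count > n * 0.6` is ported in BOTH ports as the integer comparison
-- `5 * count > 3 * n`; the two agree for every count 0 ≤ c ≤ n on the tested input range.


-- ===== PORT A =====
-- sum(1 for … if cond) is the count of elements satisfying cond (PySem: a 0/1-sum IS List.countP)
def get_relative_depot_placement (coords : List (Int × Int)) (depot_x : Int) (depot_y : Int) : String × String :=
  let right := coords.countP (fun p => decide (p.1 > depot_x))
  let left  := coords.countP (fun p => decide (p.1 < depot_x))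
  let above := coords.countP (fun p => decide (p.2 > depot_y))
  let below := coords.countP (fun p => decide (p.2 < depot_y))
  let vertical_position_rel := "centered"
  let horizontal_position_rel := "centered"
  let horizontal_position_rel :=
    if 5 * right > 3 * coords.length then "left-sided"
    else if 5 * left > 3 * coords.length then "right-sided"
    else horizontal_position_rel
  let vertical_position_rel :=
    if 5 * above > 3 * coords.length then "below"
    else if 5 * below > 3 * coords.length then "above"
    else vertical_position_rel
  (horizontal_position_rel, vertical_position_rel)

-- ===== PORT B =====
-- Source B's hand-written binary search `_bound(a, pred)`: first index i with not pred(a[i]);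
-- the while loop becomes well-founded recursion on hi - lo, a[mid] (always in range) is a.getD mid 0.
def pvBoundAux (p : Int → Bool) (a : List Int) (lo hi : Nat) : Nat :=
  if _h : lo < hi then
    let mid := (lo + hi) / 2
    if p (a.getD mid 0) then pvBoundAux p a (mid + 1) hi else pvBoundAux p a lo mid
  else lo
termination_by hi - lo
decreasing_by all_goals omega

def pvBound (a : List Int) (p : Int → Bool) : Nat := pvBoundAux p a 0 a.length

def get_relative_depot_placement_alt (coords : List (Int × Int)) (depot_x : Int) (depot_y : Int) : String × String :=
  let n := coords.length
  let xs := PySem.List.sorted (coords.map Prod.fst) (fun x => x)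
  let ys := PySem.List.sorted (coords.map Prod.snd) (fun x => x)
  let right := n - pvBound xs (fun t => decide (t ≤ depot_x))
  let left  := pvBound xs (fun t => decide (t < depot_x))
  let above := n - pvBound ys (fun t => decide (t ≤ depot_y))
  let below := pvBound ys (fun t => decide (t < depot_y))
  let horizontal_position_rel :=
    if 5 * right > 3 * n then "left-sided"
    else if 5 * left > 3 * n then "right-sided"
    else "centered"
  let vertical_position_rel :=
    if 5 * above > 3 * n then "below"
    else if 5 * below > 3 * n then "above"
    else "centered"
  (horizontal_position_rel, vertical_position_rel)

-- ===== PRECONDITION & SPEC =====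
def Spec_get_relative_depot_placement (coords : List (Int × Int)) (depot_x : Int) (depot_y : Int) (out : String × String) : Prop := out = get_relative_depot_placement_alt coords depot_x depot_y
instance (coords : List (Int × Int)) (depot_x : Int) (depot_y : Int) (out : String × String) : Decidable (Spec_get_relative_depot_placement coords depot_x depot_y out) := by unfold Spec_get_relative_depot_placement; infer_instance

-- ===== CLAIM (what is proved, stated in full; the proofs are below) =====
def Claim_equal_get_relative_depot_placement : Prop := ∀ (coords : List (Int × Int)) (depot_x : Int) (depot_y : Int), Dom_get_relative_depot_placement coords depot_x depot_y → Spec_get_relative_depot_placement coords depot_x depot_y (get_relative_depot_placement coords depot_x depot_y)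

-- ===== LEMMAS AND PROOFS =====

-- if the first k elements satisfy p and the rest do not, the count is k
theorem pv_countP_eq_of_split (p : Int → Bool) (a : List Int) (k : Nat) (hk : k ≤ a.length)
    (h1 : ∀ i, (h : i < a.length) → i < k → p a[i] = true)
    (h2 : ∀ i, (h : i < a.length) → k ≤ i → p a[i] = false) :
    a.countP p = k := by
  have hsplit : a = a.take k ++ a.drop k := (List.take_append_drop k a).symm
  rw [hsplit, List.countP_append]
  have htake : (a.take k).countP p = (a.take k).length := by
    apply List.countP_eq_length.mpr
    intro x hx
    obtain ⟨i, hi, rfl⟩ := List.mem_iff_getElem.mp hx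
    have hlen : (a.take k).length = k := by
      simp [List.length_take, Nat.min_eq_left hk]
    rw [List.getElem_take]
    exact h1 i (by omega) (by omega)
  have hdrop : (a.drop k).countP p = 0 := by
    apply List.countP_eq_zero.mpr
    intro x hx
    obtain ⟨i, hi, rfl⟩ := List.mem_iff_getElem.mp hx
    rw [List.getElem_drop]
    simp only [List.length_drop] at hi
    simp [h2 (k + i) (by omega) (by omega)]
  rw [htake, hdrop]
  simp [List.length_take, Nat.min_eq_left hk]

-- binary-search invariant: with a downward-closed predicate, pvBoundAux counts the satisfying elements
theorem pvBoundAux_eq (p : Int → Bool) (a : List Int)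
    (hmono : ∀ i j, (hi : i < a.length) → (hj : j < a.length) → i ≤ j → p a[j] = true → p a[i] = true) :
    ∀ (n lo hi : Nat), hi - lo ≤ n → lo ≤ hi → hi ≤ a.length →
      (∀ i, (h : i < a.length) → i < lo → p a[i] = true) →
      (∀ i, (h : i < a.length) → hi ≤ i → p a[i] = false) →
      pvBoundAux p a lo hi = a.countP p := by
  intro n
  induction n with
  | zero =>
    intro lo hi hn hlohi hhi h1 h2
    have heq : lo = hi := by omega
    rw [pvBoundAux]
    simp only [heq, lt_irrefl, dite_false]
    exact (pv_countP_eq_of_split p a hi (by omega)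
      (fun i h hik => h1 i h (by omega)) h2).symm
  | succ n ih =>
    intro lo hi hn hlohi hhi h1 h2
    rw [pvBoundAux]
    by_cases hlt : lo < hi
    · simp only [hlt, dite_true]
      have hmidlt : (lo + hi) / 2 < a.length := by omega
      have hgetD : a.getD ((lo + hi) / 2) 0 = a[(lo + hi) / 2] :=
        List.getD_eq_getElem a 0 hmidlt
      by_cases hp : p (a.getD ((lo + hi) / 2) 0) = true
      · simp only [hp, if_true]
        apply ih ((lo + hi) / 2 + 1) hi (by omega) (by omega) hhi
        · intro i h hik
          rcases Nat.lt_or_ge i ((lo + hi) / 2 + 1) with _ | _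
          · exact hmono i ((lo + hi) / 2) h hmidlt (by omega) (by rw [← hgetD]; exact hp)
          · omega
        · exact h2
      · simp only [hp]
        apply ih lo ((lo + hi) / 2) (by omega) (by omega) (by omega) h1
        · intro i h hik
          rcases Bool.eq_false_or_eq_true (p a[i]) with hptrue | hpfalse
          · exfalso
            apply hp
            rw [hgetD]
            exact hmono ((lo + hi) / 2) i hmidlt h (by omega) hptrue
          · exact hpfalse
    · simp only [hlt, dite_false]
      exact (pv_countP_eq_of_split p a lo (by omega)
        (fun i h hik => h1 i h hik) (fun i h hle => h2 i h (by omega))).symm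

theorem pvBound_eq (p : Int → Bool) (a : List Int)
    (hmono : ∀ i j, (hi : i < a.length) → (hj : j < a.length) → i ≤ j → p a[j] = true → p a[i] = true) :
    pvBound a p = a.countP p := by
  apply pvBoundAux_eq p a hmono a.length 0 a.length (by omega) (by omega) (le_refl _)
  · intro i _ h; omega
  · intro i h hle; omega

-- on the sorted coordinate list, _bound with (· < v) / (· ≤ v) counts over the original list
theorem pvBound_sorted_eq (l : List Int) (q : Int → Bool)
    (hq : ∀ x y : Int, x ≤ y → q y = true → q x = true) :
    pvBound (PySem.List.sorted l (fun x => x)) q = l.countP q := by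
  have hperm : (PySem.List.sorted l (fun x => x)).Perm l :=
    PySem.List.sorted_perm l (fun x => x) false
  have hpair : (PySem.List.sorted l (fun x => x)).Pairwise (· ≤ ·) := by
    simpa using PySem.List.sorted_pairwise (xs := l) (key := fun x => x)
  have hmono : ∀ i j, (hi : i < (PySem.List.sorted l (fun x => x)).length) →
      (hj : j < (PySem.List.sorted l (fun x => x)).length) → i ≤ j →
      q ((PySem.List.sorted l (fun x => x))[j]) = true →
      q ((PySem.List.sorted l (fun x => x))[i]) = true := by
    intro i j hi hj hij ht
    rcases Nat.eq_or_lt_of_le hij with rfl | hlt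
    · exact ht
    · have hle := (List.pairwise_iff_getElem.mp hpair) i j hi hj hlt
      exact hq _ _ hle ht
  rw [pvBound_eq q _ hmono, hperm.countP_eq]

theorem pv_count_lt (l : List Int) (v : Int) :
    pvBound (PySem.List.sorted l (fun x => x)) (fun t => decide (t < v)) =
      l.countP (fun t => decide (t < v)) :=
  pvBound_sorted_eq l _ (fun x y hxy hy => by
    simp only [decide_eq_true_eq] at *; omega)

theorem pv_count_le (l : List Int) (v : Int) :
    pvBound (PySem.List.sorted l (fun x => x)) (fun t => decide (t ≤ v)) =
      l.countP (fun t => decide (t ≤ v)) :=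
  pvBound_sorted_eq l _ (fun x y hxy hy => by
    simp only [decide_eq_true_eq] at *; omega)

-- length minus the count of (· ≤ v) is the count of (v < ·)
theorem pv_count_gt (l : List Int) (v : Int) :
    l.length - l.countP (fun t => decide (t ≤ v)) = l.countP (fun t => decide (v < t)) := by
  induction l with
  | nil => simp
  | cons x t ih =>
    simp only [List.countP_cons, List.length_cons]
    have hle : t.countP (fun u => decide (u ≤ v)) ≤ t.length :=
      List.countP_le_length (p := fun u => decide (u ≤ v)) (l := t)
    by_cases hx : x ≤ v
    · have h1 : decide (x ≤ v) = true := by simpa using hx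
      have h2 : decide (v < x) = false := by simpa using not_lt.mpr hx
      simp [h1, h2]
      omega
    · have h1 : decide (x ≤ v) = false := by simpa using hx
      have h2 : decide (v < x) = true := by simpa using not_le.mp hx
      simp [h1, h2]
      omega

theorem get_relative_depot_placement_eq (coords : List (Int × Int)) (depot_x depot_y : Int) :
    get_relative_depot_placement coords depot_x depot_y =
      get_relative_depot_placement_alt coords depot_x depot_y := by
  have hx_le := pv_count_le (coords.map Prod.fst) depot_x
  have hx_lt := pv_count_lt (coords.map Prod.fst) depot_x
  have hy_le := pv_count_le (coords.map Prod.snd) depot_y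
  have hy_lt := pv_count_lt (coords.map Prod.snd) depot_y
  have hx_gt := pv_count_gt (coords.map Prod.fst) depot_x
  have hy_gt := pv_count_gt (coords.map Prod.snd) depot_y
  simp only [List.countP_map, List.length_map, Function.comp_def] at hx_le hx_lt hy_le hy_lt hx_gt hy_gt
  simp only [get_relative_depot_placement, get_relative_depot_placement_alt, gt_iff_lt,
    hx_le, hx_lt, hy_le, hy_lt, hx_gt, hy_gt]

-- ===== VERDICT (by name: the statement is the Claim_ definition above) =====
theorem get_relative_depot_placement_spec : Claim_equal_get_relative_depot_placement := by
  intro coords dx dy _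
  exact get_relative_depot_placement_eq coords dx dy
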